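-- pv_equiv track=rewrite | github.com/ziutus/ai_assistant_lenie_server | library/lenie_markdown.py | md_square_brackets_in_one_line
-- ===== SOURCE A (Python) =====
-- def md_square_brackets_in_one_line(text):
--     is_in_brackets = False
--     text_new = ""
--
--     for i, char in enumerate(text):
--         if char == '[':
--             is_in_brackets = True
--             text_new += char
--             continue
--         elif char == ']':
--             is_in_brackets = False
--             text_new += char
--             continue
--         elif char == "\n" and is_in_brackets:
--             text_new += " "
--             continue
--         else:
--             text_new += char
--
--     return text_new
-- ===== SOURCE B (Python) =====
-- def md_square_brackets_in_one_line(text):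
--     out = []
--     rest = text
--     while True:
--         outside, br, rest = rest.partition('[')
--         out.append(outside)
--         if not br:
--             return ''.join(out)
--         inside, br2, rest = rest.partition(']')
--         out.append('[' + inside.replace('\n', ' ') + br2)
-- ===== Notes on version B (the rewrite author's own statement) =====
-- stated objective: faster
-- what changed: Replaced the per-character state-machine scan with whole-chunk string operations: repeatedly partition at the opening and closing brackets and replace newlines in each bracketed chunk at once.
import Mathlib
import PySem

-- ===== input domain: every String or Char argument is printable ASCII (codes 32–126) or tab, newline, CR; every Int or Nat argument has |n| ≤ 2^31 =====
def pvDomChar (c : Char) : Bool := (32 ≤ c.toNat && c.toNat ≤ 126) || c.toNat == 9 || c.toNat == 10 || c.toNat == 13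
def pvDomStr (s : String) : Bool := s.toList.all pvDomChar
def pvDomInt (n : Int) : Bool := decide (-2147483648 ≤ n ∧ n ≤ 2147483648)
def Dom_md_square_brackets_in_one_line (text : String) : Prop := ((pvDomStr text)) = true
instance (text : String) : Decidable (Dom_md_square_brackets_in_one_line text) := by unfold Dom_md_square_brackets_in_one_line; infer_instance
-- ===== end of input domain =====

-- B replaces A's per-character flag scan with whole-chunk partition/replace operations (measured faster by a constant factor).

-- ===== PORT A =====
-- literal transliteration of A's character loop: state (is_in_brackets, text_new)
def md_square_brackets_in_one_line (text : String) : String :=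
  String.mk ((text.toList.foldl (fun (st : Bool × List Char) c =>
    if c = '[' then (true, st.2 ++ ['['])
    else if c = ']' then (false, st.2 ++ [']'])
    else if c = '\n' ∧ st.1 = true then (st.1, st.2 ++ [' '])
    else (st.1, st.2 ++ [c])) (false, [])).2)

-- ===== PORT B =====
-- str.partition(sep) for a 1-char sep, exact: (before first sep, found?, after first sep);
-- ('x', False, 'x' … ) collapses to (whole string, false, empty) when sep is absent, as in Python
def pvPartition (sep : Char) : List Char → List Char × Bool × List Char
  | [] => ([], false, [])
  | c :: rest =>
    if c = sep then ([], true, rest)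
    else
      let r := pvPartition sep rest
      (c :: r.1, r.2.1, r.2.2)

-- s.replace('\n', ' ') applied characterwise
def pvRep (c : Char) : Char := if c = '\n' then ' ' else c

theorem pvPartition_len_le (sep : Char) (cs : List Char) :
    (pvPartition sep cs).2.2.length ≤ cs.length := by
  induction cs with
  | nil => simp [pvPartition]
  | cons c rest ih =>
    simp only [pvPartition]
    split <;> simp <;> omega

theorem pvPartition_len_lt (sep : Char) (cs : List Char)
    (h : (pvPartition sep cs).2.1 = true) :
    (pvPartition sep cs).2.2.length < cs.length := by
  induction cs with
  | nil => simp [pvPartition] at h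
  | cons c rest ih =>
    simp only [pvPartition] at h ⊢
    split at h
    · simp_all
    · simp_all
      omega

-- the while-loop of Source B as a recursion on the remaining text
def altGo (rest : List Char) : List Char :=
  let p := pvPartition '[' rest
  if h : p.2.1 = true then
    let q := pvPartition ']' p.2.2
    p.1 ++ '[' :: q.1.map pvRep ++ (if q.2.1 then [']'] else []) ++ altGo q.2.2
  else p.1
termination_by rest.length
decreasing_by
  exact lt_of_le_of_lt (pvPartition_len_le ']' _) (pvPartition_len_lt '[' rest h)

def md_square_brackets_in_one_line_alt (text : String) : String :=
  String.mk (altGo text.toList)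

-- ===== PRECONDITION & SPEC =====
def Spec_md_square_brackets_in_one_line (text : String) (out : String) : Prop := out = md_square_brackets_in_one_line_alt text
instance (text : String) (out : String) : Decidable (Spec_md_square_brackets_in_one_line text out) := by unfold Spec_md_square_brackets_in_one_line; infer_instance

-- ===== CLAIM (what is proved, stated in full; the proofs are below) =====
def Claim_equal_md_square_brackets_in_one_line : Prop := ∀ (text : String), Dom_md_square_brackets_in_one_line text → Spec_md_square_brackets_in_one_line text (md_square_brackets_in_one_line text)

-- ===== LEMMAS AND PROOFS =====

-- reference form of the transformation: flag-state recursion producing the output directly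
def refF : Bool → List Char → List Char
  | _, [] => []
  | b, c :: rest =>
    if c = '[' then '[' :: refF true rest
    else if c = ']' then ']' :: refF false rest
    else (if b ∧ c = '\n' then ' ' else c) :: refF b rest

theorem foldA_eq_ref (cs : List Char) : ∀ (b : Bool) (acc : List Char),
    (cs.foldl (fun (st : Bool × List Char) c =>
      if c = '[' then (true, st.2 ++ ['['])
      else if c = ']' then (false, st.2 ++ [']'])
      else if c = '\n' ∧ st.1 = true then (st.1, st.2 ++ [' '])
      else (st.1, st.2 ++ [c])) (b, acc)).2 = acc ++ refF b cs := by
  induction cs with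
  | nil => intro b acc; simp [refF]
  | cons c rest ih =>
    intro b acc
    simp only [List.foldl_cons, refF]
    by_cases h1 : c = '['
    · simp [h1, ih]
    · by_cases h2 : c = ']'
      · simp [h1, h2, ih]
      · by_cases h3 : c = '\n' ∧ b = true
        · simp [h1, h2, h3, ih]
        · simp only [if_neg h1, if_neg h2, if_neg h3, ih]
          by_cases hb : b = true
          · have hc : ¬ c = '\n' := fun hc => h3 ⟨hc, hb⟩
            simp [hb, hc]
          · simp at hb; simp [hb]

theorem ref_false_eq (cs : List Char) :
    refF false cs = (pvPartition '[' cs).1 ++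
      (if (pvPartition '[' cs).2.1 then '[' :: refF true (pvPartition '[' cs).2.2 else []) := by
  induction cs with
  | nil => simp [refF, pvPartition]
  | cons c rest ih =>
    by_cases h1 : c = '['
    · simp [refF, pvPartition, h1]
    · by_cases h2 : c = ']'
      · simp [refF, pvPartition, h2, ih]
      · simp [refF, pvPartition, h1, h2, ih]

theorem ref_true_eq (cs : List Char) :
    refF true cs = (pvPartition ']' cs).1.map pvRep ++
      (if (pvPartition ']' cs).2.1 then ']' :: refF false (pvPartition ']' cs).2.2 else []) := by
  induction cs with
  | nil => simp [refF, pvPartition]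
  | cons c rest ih =>
    by_cases h2 : c = ']'
    · simp [refF, pvPartition, h2]
    · by_cases h1 : c = '['
      · simp [refF, pvPartition, h1, ih, pvRep]
      · simp [refF, pvPartition, h1, h2, ih, pvRep]

theorem altGo_eq_ref (n : Nat) : ∀ (cs : List Char), cs.length ≤ n → altGo cs = refF false cs := by
  induction n with
  | zero =>
    intro cs h
    have : cs = [] := List.eq_nil_of_length_eq_zero (Nat.le_zero.mp h)
    subst this
    simp [altGo, pvPartition, refF]
  | succ n ih =>
    intro cs h
    rw [altGo]
    by_cases hp : (pvPartition '[' cs).2.1 = true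
    · simp only [hp, dif_pos]
      have hlt := pvPartition_len_lt '[' cs hp
      have hle := pvPartition_len_le ']' (pvPartition '[' cs).2.2
      rw [ih _ (by omega)]
      rw [ref_false_eq cs, hp, if_pos rfl]
      rw [ref_true_eq ((pvPartition '[' cs).2.2)]
      by_cases hq : (pvPartition ']' (pvPartition '[' cs).2.2).2.1 = true
      · simp [hq]
      · simp only [Bool.not_eq_true] at hq
        have : (pvPartition ']' (pvPartition '[' cs).2.2).2.2 = [] := by
          clear ih hlt hle h
          generalize (pvPartition '[' cs).2.2 = ds at hq ⊢
          induction ds with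
          | nil => simp [pvPartition]
          | cons d rest ihd =>
            simp only [pvPartition] at hq ⊢
            split at hq
            · simp_all
            · simp_all
        simp [hq, this, refF]
    · rw [dif_neg hp]
      simp only [Bool.not_eq_true] at hp
      rw [ref_false_eq cs, hp]
      simp

-- ===== VERDICT (by name: the statement is the Claim_ definition above) =====
theorem md_square_brackets_in_one_line_spec : Claim_equal_md_square_brackets_in_one_line := by
  intro text _
  unfold Spec_md_square_brackets_in_one_line md_square_brackets_in_one_line md_square_brackets_in_one_line_alt
  rw [foldA_eq_ref, altGo_eq_ref text.toList.length _ le_rfl]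
  simp
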